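-- pv_equiv track=rewrite | github.com/Standfordb/School-Projects | Projects/dna/dna.py | get_dna
-- ===== SOURCE A (Python) =====
-- def longest_match(sequence, subsequence):
--     """Returns length of longest run of subsequence in sequence."""
--
--     # Initialize variables
--     longest_run = 0
--     subsequence_length = len(subsequence)
--     sequence_length = len(sequence)
--
--     # Check each character in sequence for most consecutive runs of subsequence
--     for i in range(sequence_length):
--
--         # Initialize count of consecutive runs
--         count = 0
--
--         # Check for a subsequence match in a "substring" (a subset of characters) within sequence
--         # If a match, move substring to next potential match in sequence
--         # Continue moving substring and checking for matches until out of consecutive matches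
--         while True:
--
--             # Adjust substring start and end
--             start = i + count * subsequence_length
--             end = start + subsequence_length
--
--             # If there is a match in the substring
--             if sequence[start:end] == subsequence:
--                 count += 1
--
--             # If there is no match in the substring
--             else:
--                 break
--
--         # Update most consecutive matches found
--         longest_run = max(longest_run, count)
--
--     # After checking for runs at each character in seqeuence, return longest run found
--     return longest_run
--
-- def get_dna(subsequence, sequence):
--     dna = {}
--     idx = 0
--     for str in subsequence:
--         dna[subsequence[idx]] = 0
--         idx += 1
--
--     for str in subsequence:
--         dna[str] = longest_match(sequence, str)
--
--     return dna
-- ===== SOURCE B (Python) =====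
-- def _longest(sequence, sub):
--     """Longest consecutive run of sub in sequence via a right-to-left DP scan."""
--     L = len(sub)
--     n = len(sequence)
--     runs = [0] * (n + L)
--     best = 0
--     for i in range(n - 1, -1, -1):
--         if sequence[i:i+L] == sub:
--             v = runs[i + L] + 1
--             runs[i] = v
--             if v > best:
--                 best = v
--     return best
--
-- def get_dna(subsequence, sequence):
--     return {s: _longest(sequence, s) for s in subsequence}
-- ===== Notes on version B (the rewrite author's own statement) =====
-- stated objective: faster
-- what changed: Replaces the per-position rescanning while-loop (which re-walks the whole run at every start index) by a single right-to-left DP scan per subsequence that stores runs[i] = runs[i+L] + 1 on a match, so each position is matched once.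
-- outside the precondition, e.g. on get_dna([''], 'A'): A does not finish within the time limit, B returns {'': 1}
import Mathlib
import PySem

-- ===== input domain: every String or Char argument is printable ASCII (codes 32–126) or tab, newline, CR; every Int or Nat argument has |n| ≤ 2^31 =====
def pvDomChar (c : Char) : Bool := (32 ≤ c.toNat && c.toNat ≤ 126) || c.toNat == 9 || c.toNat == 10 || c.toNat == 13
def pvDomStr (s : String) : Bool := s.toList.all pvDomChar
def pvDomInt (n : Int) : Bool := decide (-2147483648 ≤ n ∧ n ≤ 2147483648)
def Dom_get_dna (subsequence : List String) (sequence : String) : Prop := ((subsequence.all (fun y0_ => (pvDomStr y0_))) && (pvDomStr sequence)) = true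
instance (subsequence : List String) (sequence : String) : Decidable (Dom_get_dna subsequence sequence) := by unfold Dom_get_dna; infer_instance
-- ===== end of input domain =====

-- B replaces A's per-position rescanning while-loop by a single right-to-left DP scan per
-- subsequence (runs[i] = runs[i+L] + 1 on a match); asymptotically fewer character comparisons.


-- ===== PORT A =====
-- A's inner `while True` loop: count consecutive matches of s starting at `start`, stepping by
-- len(s).  The loop is modelled with fuel seq.length + 1, which exceeds the number of
-- iterations whenever s ≠ [] (guaranteed by Pre_; on s = [] the Python loop diverges).
def pvCountA (seq s : List Char) : Nat → Nat → Int
  | 0, _ => 0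
  | fuel + 1, start =>
      if PySem.List.slice seq (some (start : Int)) (some ((start : Int) + (s.length : Int))) = s
      then 1 + pvCountA seq s fuel (start + s.length)
      else 0

-- body of A's `for i in range(sequence_length)` loop: longest_run = max(longest_run, count)
def pvLoopA (seq s : List Char) (longest_run : Int) (i : Int) : Int :=
  max longest_run (pvCountA seq s (seq.length + 1) i.toNat)

def longest_match (sequence subseq : String) : Int :=
  let seq := sequence.toList
  let s := subseq.toList
  (PySem.List.pyRange 0 (seq.length : Int) 1).foldl (pvLoopA seq s) 0

def get_dna (subsequence : List String) (sequence : String) : List (String × Int) :=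
  -- first loop: dna[subsequence[idx]] = 0; idx += 1   (idx always in range, so the
  -- pyGetD default "" is never used)
  let pass1 := subsequence.foldl
    (fun (p : PySem.Dict String Int × Int) _str =>
      (p.1.insert (PySem.List.pyGetD subsequence p.2 "") 0, p.2 + 1))
    (PySem.Dict.empty, 0)
  -- second loop: dna[str] = longest_match(sequence, str)
  let dna := subsequence.foldl
    (fun d str => d.insert str (longest_match sequence str)) pass1.1
  dna.items

-- ===== PORT B =====
-- body of B's `for i in range(n-1, -1, -1)` loop over the state (runs, best)
def pvStepB (seq s : List Char) (st : List Int × Int) (i : Int) : List Int × Int :=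
  if PySem.List.slice seq (some i) (some (i + (s.length : Int))) = s then
    let v := st.1.getD (i.toNat + s.length) 0 + 1
    (st.1.set i.toNat v, if v > st.2 then v else st.2)
  else st

def pvLongestAlt (sequence subseq : String) : Int :=
  let seq := sequence.toList
  let s := subseq.toList
  ((PySem.List.pyRange ((seq.length : Int) - 1) (-1) (-1)).foldl (pvStepB seq s)
    (List.replicate (seq.length + s.length) (0 : Int), 0)).2

def get_dna_alt (subsequence : List String) (sequence : String) : List (String × Int) :=
  (subsequence.foldl
    (fun (d : PySem.Dict String Int) s => d.insert s (pvLongestAlt sequence s))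
    PySem.Dict.empty).items

-- ===== PRECONDITION & SPEC =====
-- Pre_ excludes an empty string among the subsequences when the sequence is nonempty:
-- there A's while-loop never exits ('' always matches), so A diverges and returns nothing.
def Pre_get_dna (subsequence : List String) (sequence : String) : Prop :=
  ∀ s ∈ subsequence, s ≠ "" ∨ sequence = ""
instance (subsequence : List String) (sequence : String) : Decidable (Pre_get_dna subsequence sequence) := by
  unfold Pre_get_dna; infer_instance
def pvWitness_get_dna : List String × String := (["AG", "C"], "CAGAGT")

def Spec_get_dna (subsequence : List String) (sequence : String) (out : List (String × Int)) : Prop := out = get_dna_alt subsequence sequence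
instance (subsequence : List String) (sequence : String) (out : List (String × Int)) : Decidable (Spec_get_dna subsequence sequence out) := by unfold Spec_get_dna; infer_instance

-- ===== CLAIM (what is proved, stated in full; the proofs are below) =====
def Claim_equal_get_dna : Prop := ∀ (subsequence : List String) (sequence : String), Dom_get_dna subsequence sequence → Pre_get_dna subsequence sequence → Spec_get_dna subsequence sequence (get_dna subsequence sequence)

-- ===== LEMMAS AND PROOFS =====

-- the slice both programs take is a drop/take
theorem pv_slice_eq (seq s : List Char) (i : Nat) :
    PySem.List.slice seq (some (i : Int)) (some ((i : Int) + (s.length : Int))) =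
      List.take s.length (List.drop i seq) :=
  PySem.List.slice_natCast_add seq i s.length

-- a (nonempty) match starting at i fits inside seq
theorem pv_match_bound (seq s : List Char) (hs : s ≠ []) (i : Nat)
    (h : List.take s.length (List.drop i seq) = s) : i + s.length ≤ seq.length := by
  have hlen := congrArg List.length h
  simp [List.length_take, List.length_drop] at hlen
  have : s.length ≠ 0 := by simpa using hs
  omega

-- the fuel used by the port of A is irrelevant once it exceeds the remaining length
theorem pvCountA_succ (seq s : List Char) (fuel i : Nat) :
    pvCountA seq s (fuel + 1) i =
      if List.take s.length (List.drop i seq) = s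
      then 1 + pvCountA seq s fuel (i + s.length) else 0 := by
  simp only [pvCountA, pv_slice_eq]

theorem pv_countA_stable (seq s : List Char) (hs : s ≠ []) :
    ∀ f1 f2 i, seq.length - i < f1 → seq.length - i < f2 →
      pvCountA seq s f1 i = pvCountA seq s f2 i := by
  intro f1
  induction f1 with
  | zero => intro f2 i h1 h2; omega
  | succ f ih =>
    intro f2 i h1 h2
    cases f2 with
    | zero => omega
    | succ f2' =>
      rw [pvCountA_succ, pvCountA_succ]
      by_cases hm : List.take s.length (List.drop i seq) = s
      · have hb := pv_match_bound seq s hs i hm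
        have hsl : s.length ≠ 0 := by simpa using hs
        rw [if_pos hm, if_pos hm, ih f2' (i + s.length) (by omega) (by omega)]
      · rw [if_neg hm, if_neg hm]

-- the true consecutive-match count starting at i
def pvF (seq s : List Char) (i : Nat) : Int := pvCountA seq s (seq.length + 1) i

theorem pv_countA_nonneg (seq s : List Char) : ∀ fuel i, 0 ≤ pvCountA seq s fuel i := by
  intro fuel
  induction fuel with
  | zero => intro i; simp [pvCountA]
  | succ f ih =>
    intro i
    simp only [pvCountA]
    split_ifs
    · have := ih (i + s.length); omega
    · omega

theorem pvF_rec (seq s : List Char) (hs : s ≠ []) (i : Nat) :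
    pvF seq s i =
      if List.take s.length (List.drop i seq) = s then 1 + pvF seq s (i + s.length) else 0 := by
  unfold pvF
  rw [pvCountA_succ]
  by_cases hm : List.take s.length (List.drop i seq) = s
  · have hb := pv_match_bound seq s hs i hm
    have hsl : s.length ≠ 0 := by simpa using hs
    rw [if_pos hm, if_pos hm,
      pv_countA_stable seq s hs seq.length (seq.length + 1) (i + s.length) (by omega) (by omega)]
  · rw [if_neg hm, if_neg hm]

theorem pvF_of_ge (seq s : List Char) (hs : s ≠ []) (i : Nat) (h : seq.length ≤ i) :
    pvF seq s i = 0 := by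
  rw [pvF_rec seq s hs i]
  have hsl : s.length ≠ 0 := by simpa using hs
  rw [if_neg]
  intro hm
  have := pv_match_bound seq s hs i hm
  omega

-- max of pvF over [i, seq.length)
def pvM (seq s : List Char) (i : Nat) : Int :=
  if i < seq.length then max (pvF seq s i) (pvM seq s (i + 1)) else 0
termination_by seq.length - i

theorem pvM_nonneg (seq s : List Char) : ∀ i, 0 ≤ pvM seq s i := by
  have key : ∀ k i, seq.length - i ≤ k → 0 ≤ pvM seq s i := by
    intro k
    induction k with
    | zero => intro i hk; rw [pvM, if_neg (by omega)]
    | succ k ih =>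
      intro i hk
      by_cases hlt : i < seq.length
      · rw [pvM, if_pos hlt]
        exact le_trans (ih (i + 1) (by omega)) (le_max_right _ _)
      · rw [pvM, if_neg hlt]
  intro i
  exact key seq.length i (by omega)

-- A's for-loop computes pvM
theorem pv_foldA (seq s : List Char) :
    ∀ k i (acc : Int), seq.length - i ≤ k → i ≤ seq.length → 0 ≤ acc →
      (PySem.List.pyRange (i : Int) (seq.length : Int) 1).foldl (pvLoopA seq s) acc =
        max acc (pvM seq s i) := by
  intro k
  induction k with
  | zero =>
    intro i acc hk hi hacc
    have hin : i = seq.length := by omega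
    subst hin
    rw [PySem.List.pyRange_one_eq_nil (le_refl _)]
    rw [pvM, if_neg (by omega)]
    simp [max_eq_left hacc]
  | succ k ih =>
    intro i acc hk hi hacc
    by_cases hlt : i < seq.length
    · rw [PySem.List.pyRange_one_cons (by exact_mod_cast hlt)]
      simp only [List.foldl_cons]
      have hcast : ((i : Int) + 1) = ((i + 1 : Nat) : Int) := by push_cast; ring
      rw [hcast, ih (i + 1) (pvLoopA seq s acc (i : Int)) (by omega) (by omega)
        (by unfold pvLoopA; have := pv_countA_nonneg seq s (seq.length + 1) ((i : Int).toNat); omega)]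
      unfold pvLoopA
      rw [Int.toNat_natCast]
      conv_rhs => rw [pvM, if_pos hlt]
      rw [max_assoc]
      rfl
    · have hin : i = seq.length := by omega
      subst hin
      rw [PySem.List.pyRange_one_eq_nil (le_refl _)]
      rw [pvM, if_neg (by omega)]
      simp [max_eq_left hacc]

theorem longest_match_eq (sequence subseq : String) :
    longest_match sequence subseq = pvM sequence.toList subseq.toList 0 := by
  have h := pv_foldA sequence.toList subseq.toList sequence.toList.length 0 0
    (by omega) (by omega) le_rfl
  calc longest_match sequence subseq
      = (PySem.List.pyRange ((0 : Nat) : Int) (sequence.toList.length : Int) 1).foldl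
          (pvLoopA sequence.toList subseq.toList) 0 := rfl
    _ = max 0 (pvM sequence.toList subseq.toList 0) := h
    _ = pvM sequence.toList subseq.toList 0 := max_eq_right (pvM_nonneg _ _ 0)

-- B's runs array after the suffix [i, n) has been processed
def pvR (seq s : List Char) (i : Nat) : List Int :=
  (List.range (seq.length + s.length)).map
    (fun j => if i ≤ j ∧ j < seq.length then pvF seq s j else 0)

theorem pvR_getD (seq s : List Char) (i j : Nat) :
    (pvR seq s i).getD j 0 =
      if i ≤ j ∧ j < seq.length then pvF seq s j else 0 := by
  unfold pvR
  by_cases hj : j < seq.length + s.length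
  · rw [List.getD_eq_getElem _ _ (by simpa using hj)]
    simp
  · rw [List.getD_eq_default _ _ (by simpa using hj)]
    rw [if_neg (by omega)]

theorem pvR_length (seq s : List Char) (i : Nat) :
    (pvR seq s i).length = seq.length + s.length := by
  simp [pvR]

-- one step of B's loop moves the invariant from i+1 to i
theorem pv_stepB_inv (seq s : List Char) (hs : s ≠ []) (i : Nat) (hlt : i < seq.length) :
    pvStepB seq s (pvR seq s (i + 1), pvM seq s (i + 1)) (i : Int) =
      (pvR seq s i, pvM seq s i) := by
  have hsl : s.length ≠ 0 := by simpa using hs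
  unfold pvStepB
  rw [pv_slice_eq, Int.toNat_natCast]
  by_cases hm : List.take s.length (List.drop i seq) = s
  · rw [if_pos hm]
    have hF : pvF seq s i = 1 + pvF seq s (i + s.length) := by
      rw [pvF_rec seq s hs i, if_pos hm]
    have hv : (pvR seq s (i + 1)).getD (i + s.length) 0 + 1 = pvF seq s i := by
      rw [pvR_getD]
      by_cases hend : i + s.length < seq.length
      · rw [if_pos ⟨by omega, hend⟩]; omega
      · rw [if_neg (by omega), hF, pvF_of_ge seq s hs (i + s.length) (by omega)]
        omega
    simp only [hv]
    rw [Prod.mk.injEq]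
    constructor
    · -- the runs list
      apply List.ext_getElem
      · simp [pvR_length]
      · intro j hj1 hj2
        rw [pvR_length] at hj2
        rw [List.getElem_set]
        by_cases hji : i = j
        · subst hji
          rw [if_pos rfl]
          simp only [pvR, List.getElem_map, List.getElem_range]
          rw [if_pos ⟨le_refl _, hlt⟩]
        · rw [if_neg hji]
          simp only [pvR, List.getElem_map, List.getElem_range]
          split_ifs <;> first | rfl | omega
    · -- best
      conv_rhs => rw [pvM, if_pos hlt]
      rw [max_def]
      split_ifs <;> omega
  · rw [if_neg hm]
    have hF : pvF seq s i = 0 := by rw [pvF_rec seq s hs i, if_neg hm]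
    rw [Prod.mk.injEq]
    constructor
    · unfold pvR
      apply List.map_congr_left
      intro j hj
      by_cases hji : j = i
      · subst hji
        rw [if_neg (by omega), if_pos ⟨le_refl _, hlt⟩, hF]
      · split_ifs <;> first | rfl | omega
    · conv_rhs => rw [pvM, if_pos hlt]
      rw [hF, max_eq_right (pvM_nonneg seq s (i + 1))]

-- B's whole loop, folded over the reversed ascending range
theorem pv_foldB (seq s : List Char) (hs : s ≠ []) :
    ∀ k i, seq.length - i ≤ k → i ≤ seq.length →
      ((PySem.List.pyRange (i : Int) (seq.length : Int) 1).reverse).foldl (pvStepB seq s)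
          (List.replicate (seq.length + s.length) (0 : Int), 0) =
        (pvR seq s i, pvM seq s i) := by
  intro k
  induction k with
  | zero =>
    intro i hk hi
    have hin : i = seq.length := by omega
    subst hin
    rw [PySem.List.pyRange_one_eq_nil (le_refl _)]
    simp only [List.reverse_nil, List.foldl_nil]
    rw [Prod.mk.injEq]
    constructor
    · unfold pvR
      apply List.ext_getElem
      · simp
      · intro j hj1 hj2
        simp only [List.getElem_replicate, List.getElem_map, List.getElem_range]
        rw [if_neg (by omega)]
    · rw [pvM, if_neg (by omega)]
  | succ k ih =>
    intro i hk hi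
    by_cases hlt : i < seq.length
    · rw [PySem.List.pyRange_one_cons (by exact_mod_cast hlt)]
      rw [List.reverse_cons, List.foldl_append]
      have hcast : ((i : Int) + 1) = ((i + 1 : Nat) : Int) := by push_cast; ring
      rw [hcast, ih (i + 1) (by omega) (by omega)]
      simp only [List.foldl_cons, List.foldl_nil]
      exact pv_stepB_inv seq s hs i hlt
    · have hin : i = seq.length := by omega
      subst hin
      rw [PySem.List.pyRange_one_eq_nil (le_refl _)]
      simp only [List.reverse_nil, List.foldl_nil]
      rw [Prod.mk.injEq]
      constructor
      · unfold pvR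
        apply List.ext_getElem
        · simp
        · intro j hj1 hj2
          simp only [List.getElem_replicate, List.getElem_map, List.getElem_range]
          rw [if_neg (by omega)]
      · rw [pvM, if_neg (by omega)]

theorem pvLongestAlt_eq (sequence subseq : String) (hs : subseq ≠ "" ∨ sequence = "") :
    pvLongestAlt sequence subseq = pvM sequence.toList subseq.toList 0 := by
  rcases hs with hs | hs
  case inr =>
    -- empty sequence: both the loop range and pvM are trivial, whatever subseq is
    have hseq : sequence.toList = [] := by simp [hs]
    calc pvLongestAlt sequence subseq
        = ((PySem.List.pyRange ((sequence.toList.length : Int) - 1) (-1) (-1)).foldl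
            (pvStepB sequence.toList subseq.toList)
            (List.replicate (sequence.toList.length + subseq.toList.length) (0 : Int), 0)).2 := rfl
      _ = 0 := by
            rw [hseq]
            rw [show ((([] : List Char).length : Int) - 1) = (-1 : Int) from by simp]
            rw [PySem.List.pyRange_neg_one_eq_nil (le_refl (-1))]
            rfl
      _ = pvM sequence.toList subseq.toList 0 := by
            rw [pvM, if_neg (by simp [hseq])]
  have hsl : subseq.toList ≠ [] := by simpa using hs
  have key := pv_foldB sequence.toList subseq.toList hsl sequence.toList.length 0
    (by omega) (by omega)
  calc pvLongestAlt sequence subseq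
      = ((PySem.List.pyRange ((sequence.toList.length : Int) - 1) (-1) (-1)).foldl
          (pvStepB sequence.toList subseq.toList)
          (List.replicate (sequence.toList.length + subseq.toList.length) (0 : Int), 0)).2 := rfl
    _ = pvM sequence.toList subseq.toList 0 := by
        rw [PySem.List.pyRange_neg_one_eq_reverse,
          show ((-1 : Int) + 1) = ((0 : Nat) : Int) from by norm_num,
          show ((sequence.toList.length : Int) - 1 + 1) = (sequence.toList.length : Int) from by ring,
          key]

-- the two loops of A agree with B's single dict comprehension
theorem pv_getD_foldl_insert (v : String → Int) :
    ∀ (l : List String) (d : PySem.Dict String Int) (k : String),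
      (l.foldl (fun d s => d.insert s (v s)) d).getD k 0 =
        if k ∈ l then v k else d.getD k 0 := by
  intro l
  induction l with
  | nil => intro d k; simp
  | cons a t ih =>
    intro d k
    simp only [List.foldl_cons]
    rw [ih]
    by_cases hk : k ∈ t
    · rw [if_pos hk, if_pos (by simp [hk])]
    · rw [if_neg hk, PySem.Dict.getD_insert]
      by_cases hka : k = a
      · subst hka
        rw [if_pos rfl, if_pos (by simp)]
      · rw [if_neg hka, if_neg (by simp [hk, hka])]

-- A's indexed first loop is a plain insert loop
theorem pv_pass1_eq (l : List String) :
    ∀ (t pre : List String) (d : PySem.Dict String Int), l = pre ++ t →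
      t.foldl
          (fun (p : PySem.Dict String Int × Int) _str =>
            (p.1.insert (PySem.List.pyGetD l p.2 "") 0, p.2 + 1))
          (d, (pre.length : Int)) =
        (t.foldl (fun d s => d.insert s (0 : Int)) d, ((pre.length + t.length : Nat) : Int)) := by
  intro t
  induction t with
  | nil => intro pre d h; simp
  | cons a t ih =>
    intro pre d h
    simp only [List.foldl_cons]
    have hget : PySem.List.pyGetD l (pre.length : Int) "" = a := by
      subst h
      rw [PySem.List.pyGetD_natCast]
      rw [List.getD_eq_getElem _ _ (by simp)]
      simp [List.getElem_append_right (le_refl pre.length)]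
    rw [hget]
    have hcast : ((pre.length : Int) + 1) = (((pre ++ [a]).length : Nat) : Int) := by
      simp only [List.length_append, List.length_cons, List.length_nil]
      push_cast
      ring
    rw [hcast, ih (pre ++ [a]) (d.insert a 0) (by simp [h])]
    rw [Prod.mk.injEq]
    refine ⟨rfl, ?_⟩
    simp only [List.length_append, List.length_cons, List.length_nil]
    push_cast
    ring

-- inserting all keys with 0 first, then overwriting each with v, is inserting v directly
theorem pv_two_pass (v : String → Int) (l : List String) :
    (l.foldl (fun d s => d.insert s (v s))
        (l.foldl (fun (d : PySem.Dict String Int) s => d.insert s (0 : Int))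
          PySem.Dict.empty)).items =
      (l.foldl (fun (d : PySem.Dict String Int) s => d.insert s (v s)) PySem.Dict.empty).items := by
  have hkB : (l.foldl (fun (d : PySem.Dict String Int) s => d.insert s (v s))
      PySem.Dict.empty).keys = PySem.Set.ofList l := by
    rw [PySem.Dict.keys_foldl_insert l (fun _ s => v s), PySem.Dict.keys_empty,
      PySem.Set.update_nil_left]
  have hk0 : (l.foldl (fun (d : PySem.Dict String Int) s => d.insert s (0 : Int))
      PySem.Dict.empty).keys = PySem.Set.ofList l := by
    rw [PySem.Dict.keys_foldl_insert l (fun _ _ => (0 : Int)), PySem.Dict.keys_empty,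
      PySem.Set.update_nil_left]
  have hkA : (l.foldl (fun d s => d.insert s (v s))
      (l.foldl (fun (d : PySem.Dict String Int) s => d.insert s (0 : Int))
        PySem.Dict.empty)).keys = PySem.Set.ofList l := by
    rw [PySem.Dict.keys_foldl_insert l (fun _ s => v s), hk0,
      PySem.Set.update_eq_append_filter]
    have : List.filter (fun y => !(PySem.Set.ofList l).contains y) (PySem.Set.ofList l) = [] := by
      rw [List.filter_eq_nil_iff]
      intro y hy
      simp [PySem.Set.contains_eq_listContains, hy]
    rw [this, List.append_nil]
  have hnd0 : (l.foldl (fun (d : PySem.Dict String Int) s => d.insert s (0 : Int))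
      PySem.Dict.empty).keys.Nodup :=
    PySem.Dict.nodup_keys_foldl_insert l (fun _ _ => (0 : Int)) _ (by simp [PySem.Dict.keys_empty])
  have hndA := PySem.Dict.nodup_keys_foldl_insert l (fun _ s => v s) _ hnd0
  have hndB := PySem.Dict.nodup_keys_foldl_insert l (fun _ s => v s)
    (PySem.Dict.empty (κ := String) (ν := Int)) (by simp [PySem.Dict.keys_empty])
  rw [PySem.Dict.items_eq_map_keys _ hndA 0, PySem.Dict.items_eq_map_keys _ hndB 0, hkA, hkB]
  apply List.map_congr_left
  intro k hk
  have hkl : k ∈ l := (PySem.Set.mem_ofList l k).mp hk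
  rw [pv_getD_foldl_insert v l _ k, pv_getD_foldl_insert v l _ k, if_pos hkl, if_pos hkl]

-- ===== VERDICT (by name: the statement is the Claim_ definition above) =====
theorem get_dna_spec : Claim_equal_get_dna := by
  intro subsequence sequence _hdom hpre
  unfold Spec_get_dna get_dna get_dna_alt
  simp only []
  -- first loop of A
  rw [show ((PySem.Dict.empty (κ := String) (ν := Int), (0 : Int)) =
      (PySem.Dict.empty (κ := String) (ν := Int), (([] : List String).length : Int))) from by simp]
  rw [pv_pass1_eq subsequence subsequence [] PySem.Dict.empty (by simp)]
  -- B's values agree with A's on every subsequence string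
  rw [PySem.List.foldl_congr_mem subsequence
    (fun (d : PySem.Dict String Int) s => d.insert s (pvLongestAlt sequence s))
    (fun (d : PySem.Dict String Int) s => d.insert s (longest_match sequence s))
    PySem.Dict.empty
    (by
      intro d s hsmem
      show d.insert s (pvLongestAlt sequence s) = d.insert s (longest_match sequence s)
      rw [pvLongestAlt_eq sequence s (hpre s hsmem), longest_match_eq])]
  exact pv_two_pass (fun s => longest_match sequence s) subsequence
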